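-- pv_equiv track=rewrite | github.com/frymash/NUS-CS1010X | past_year_papers/PE/2020/1010x_2020_pe_solutions.py | max_ET_number
-- ===== SOURCE A (Python) =====
-- def val(alien_num, digits):
--         val = 0
--         for i in alien_num:
--             val = val*len(digits) + digits[i]
--         return val
--
-- def max_ET_number(ET_numbers, mapping):
--     max_index = 0
--     digits = {}
--     count = 0
--     for num in mapping:
--         digits[num] = count
--         count += 1
--     # we are going to track the max ET number via its index
--     index = 0
--     for i in ET_numbers:
--         if val(ET_numbers[max_index], digits) < val(i, digits):
--             max_index = index
--         index += 1
--     return ET_numbers[max_index]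
-- ===== SOURCE B (Python) =====
-- def max_ET_number(ET_numbers, mapping):
--     digits = {d: i for i, d in enumerate(mapping)}
--     def decode(num):
--         value = 0
--         for d in num:
--             value = value * len(digits) + digits[d]
--         return value
--     return sorted(ET_numbers, key=decode, reverse=True)[0]
-- ===== Notes on version B (the rewrite author's own statement) =====
-- stated objective: alternative
-- what changed: Builds the digit dict with an enumerate comprehension and replaces the index-tracking single-pass max (which re-decodes the current champion on every iteration) by a stable reverse sort on the decoded value, returning its first element; stability preserves first-wins on ties.
import Mathlib
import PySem

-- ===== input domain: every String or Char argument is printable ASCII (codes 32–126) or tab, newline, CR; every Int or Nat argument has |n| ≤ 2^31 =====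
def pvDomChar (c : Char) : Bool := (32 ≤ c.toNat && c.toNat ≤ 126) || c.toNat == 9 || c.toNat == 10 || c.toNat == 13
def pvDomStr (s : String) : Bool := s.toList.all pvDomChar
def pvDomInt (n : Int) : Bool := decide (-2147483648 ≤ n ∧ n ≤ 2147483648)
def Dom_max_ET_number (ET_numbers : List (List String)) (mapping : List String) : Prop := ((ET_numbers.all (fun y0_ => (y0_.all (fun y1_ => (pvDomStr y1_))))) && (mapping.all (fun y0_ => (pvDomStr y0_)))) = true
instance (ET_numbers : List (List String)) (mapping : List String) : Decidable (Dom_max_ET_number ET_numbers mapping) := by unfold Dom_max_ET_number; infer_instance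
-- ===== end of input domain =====

-- B replaces A's index-tracking single-pass max (with a hand-built counter dict) by a stable
-- reverse sort on the decoded value, returning its first element (objective: alternative, not faster).

-- ===== PORT A =====
-- val(alien_num, digits); digits[i] would raise KeyError for a symbol not in the dict —
-- Pre_ guarantees every symbol is a key, so getD's default 0 is never consulted.
def pvValA (alien_num : List String) (digits : PySem.Dict String Int) : Int :=
  alien_num.foldl (fun v i => v * (PySem.Dict.size digits : Int) + digits.getD i 0) 0

-- the 'for num in mapping: digits[num] = count; count += 1' loop
def pvDigitsA (mapping : List String) : PySem.Dict String Int :=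
  (mapping.foldl (fun (p : PySem.Dict String Int × Int) num => (p.1.insert num p.2, p.2 + 1))
    (PySem.Dict.empty, 0)).1

-- ET_numbers[max_index] would raise IndexError only for ET_numbers = []; Pre_ excludes that,
-- so getD's default [] is never consulted.
def max_ET_number (ET_numbers : List (List String)) (mapping : List String) : List String :=
  let digits := pvDigitsA mapping
  let final := ET_numbers.foldl
    (fun (p : Int × Int) i =>
      (if pvValA ((PySem.List.pyGet? ET_numbers p.1).getD []) digits < pvValA i digits
       then p.2 else p.1, p.2 + 1))
    (0, 0)
  (PySem.List.pyGet? ET_numbers final.1).getD []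

-- ===== PORT B =====
-- digits = {d: i for i, d in enumerate(mapping)}
def pvDigitsB (mapping : List String) : PySem.Dict String Int :=
  (PySem.List.enumerate mapping 0).foldl
    (fun (d : PySem.Dict String Int) p => d.insert p.2 p.1) PySem.Dict.empty

-- decode(num); digits[d] exact under Pre_ (every symbol is a key)
def pvDecodeB (num : List String) (digits : PySem.Dict String Int) : Int :=
  num.foldl (fun value d => value * (PySem.Dict.size digits : Int) + digits.getD d 0) 0

-- sorted(ET_numbers, key=decode, reverse=True)[0]; the [0] is exact under Pre_ (nonempty)
def max_ET_number_alt (ET_numbers : List (List String)) (mapping : List String) : List String :=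
  let digits := pvDigitsB mapping
  (PySem.List.pyGet? (PySem.List.sorted ET_numbers (fun num => pvDecodeB num digits) true) 0).getD []

-- ===== PRECONDITION & SPEC =====
-- A raises IndexError on ET_numbers = [] and KeyError when a symbol of an ET number is not in
-- mapping (B raises there too); Pre_ excludes exactly those inputs.
def Pre_max_ET_number (ET_numbers : List (List String)) (mapping : List String) : Prop :=
  ET_numbers ≠ [] ∧ ∀ num ∈ ET_numbers, ∀ s ∈ num, s ∈ mapping
instance (ET_numbers : List (List String)) (mapping : List String) : Decidable (Pre_max_ET_number ET_numbers mapping) := by unfold Pre_max_ET_number; infer_instance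

def pvWitness_max_ET_number : List (List String) × List String :=
  ([["a"], ["b", "a"]], ["a", "b"])

def Spec_max_ET_number (ET_numbers : List (List String)) (mapping : List String) (out : List String) : Prop := out = max_ET_number_alt ET_numbers mapping
instance (ET_numbers : List (List String)) (mapping : List String) (out : List String) : Decidable (Spec_max_ET_number ET_numbers mapping out) := by unfold Spec_max_ET_number; infer_instance

-- ===== CLAIM (what is proved, stated in full; the proofs are below) =====
def Claim_equal_max_ET_number : Prop := ∀ (ET_numbers : List (List String)) (mapping : List String), Dom_max_ET_number ET_numbers mapping → Pre_max_ET_number ET_numbers mapping → Spec_max_ET_number ET_numbers mapping (max_ET_number ET_numbers mapping)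

-- ===== LEMMAS AND PROOFS =====

-- the two dict constructions coincide
theorem pvDigits_eq_aux (mapping : List String) :
    ∀ (d : PySem.Dict String Int) (c : Int),
      (PySem.List.enumerate mapping c).foldl
          (fun (d : PySem.Dict String Int) p => d.insert p.2 p.1) d
        = (mapping.foldl (fun (p : PySem.Dict String Int × Int) num => (p.1.insert num p.2, p.2 + 1))
            (d, c)).1 := by
  induction mapping with
  | nil => intro d c; simp [PySem.List.enumerate]
  | cons x xs ih =>
      intro d c
      rw [PySem.List.enumerate_cons]
      simpa using ih (d.insert x c) (c + 1)

theorem pvDigits_eq (mapping : List String) : pvDigitsB mapping = pvDigitsA mapping := by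
  simpa [pvDigitsB, pvDigitsA] using pvDigits_eq_aux mapping PySem.Dict.empty 0

theorem pvDecode_eq (num : List String) (d : PySem.Dict String Int) :
    pvDecodeB num d = pvValA num d := rfl

-- head of the insertion-sort fold is the running first-max fold
theorem pvHead_sort_fold {α : Type} (before : α → α → Bool) :
    ∀ (xs : List α) (acc : List α),
      ((xs.foldl (fun a y => PySem.List.insertBy before y a) acc).head?)
        = xs.foldl
            (fun (h : Option α) y =>
              match h with
              | none => some y
              | some m => if before y m then some y else some m)
            acc.head? := by
  intro xs
  induction xs with
  | nil => intro acc; rfl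
  | cons y ys ih =>
      intro acc
      rw [List.foldl_cons, List.foldl_cons, ih]
      congr 1
      cases acc with
      | nil => rfl
      | cons m t => by_cases h : before y m = true <;> simp [PySem.List.insertBy, h]

-- head of sorted(..., reverse=True) is Python's max(..., key=...)
theorem pvHead_sorted_rev {α : Type} (xs : List α) (key : α → Int) :
    (PySem.List.sorted xs key true).head? = PySem.List.max? xs key := by
  rw [PySem.List.sorted, PySem.List.max?]
  rw [pvHead_sort_fold]
  simp only [List.head?_nil]
  congr 1
  funext acc y
  cases acc with
  | none => rfl
  | some m => simp

-- max? over a cons as a plain running-max fold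
theorem pvMax?_fold {α : Type} (key : α → Int) :
    ∀ (t : List α) (m : α),
      t.foldl
          (fun (acc : Option α) x =>
            match acc with
            | none => some x
            | some m => if key m < key x then some x else some m)
          (some m)
        = some (t.foldl (fun m x => if key m < key x then x else m) m) := by
  intro t
  induction t with
  | nil => intro m; rfl
  | cons x xs ih =>
      intro m
      rw [List.foldl_cons, List.foldl_cons]
      by_cases h : key m < key x <;> simp [h, ih]

-- invariant of A's index-tracking loop: champion index always points at the running max
theorem pvLoopA_inv (L : List (List String)) (digits : PySem.Dict String Int) :
    ∀ (d n : Nat) (mi : Int) (c : List String),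
      L.length - n = d →
      PySem.List.pyGet? L mi = some c →
      PySem.List.pyGet? L
          (((L.drop n).foldl
              (fun (p : Int × Int) i =>
                (if pvValA ((PySem.List.pyGet? L p.1).getD []) digits < pvValA i digits
                 then p.2 else p.1, p.2 + 1))
              (mi, (n : Int))).1)
        = some ((L.drop n).foldl
            (fun m x => if pvValA m digits < pvValA x digits then x else m) c) := by
  intro d
  induction d with
  | zero =>
      intro n mi c hd hc
      have hn : L.length ≤ n := by omega
      simp [List.drop_eq_nil_of_le hn, hc]
  | succ d ih =>
      intro n mi c hd hc
      have hn : n < L.length := by omega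
      have hdrop : L.drop n = L[n] :: L.drop (n + 1) :=
        (List.getElem_cons_drop hn).symm
      rw [hdrop, List.foldl_cons, List.foldl_cons]
      have hmi : (PySem.List.pyGet? L mi).getD [] = c := by rw [hc]; rfl
      rw [hmi]
      by_cases h : pvValA c digits < pvValA L[n] digits
      · simp only [h, if_pos]
        have hget : PySem.List.pyGet? L ((n : Int)) = some L[n] := by
          rw [PySem.List.pyGet?_natCast]; simp
        have := ih (n + 1) ((n : Int)) L[n] (by omega) hget
        rw [show ((n : Int) + 1) = ((n + 1 : Nat) : Int) by push_cast; ring]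
        exact this
      · simp only [h, if_neg, not_false_iff]
        have := ih (n + 1) mi c (by omega) hc
        rw [show ((n : Int) + 1) = ((n + 1 : Nat) : Int) by push_cast; ring]
        exact this

-- ===== VERDICT (by name: the statement is the Claim_ definition above) =====
theorem max_ET_number_spec : Claim_equal_max_ET_number := by
  intro L mapping _ hpre
  obtain ⟨hne, _⟩ := hpre
  unfold Spec_max_ET_number max_ET_number max_ET_number_alt
  dsimp only []
  rw [pvDigits_eq]
  set digits := pvDigitsA mapping with hdig
  obtain ⟨h, t, rfl⟩ := List.exists_cons_of_ne_nil hne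
  -- A's side: the loop yields the running first-max
  have hc0 : PySem.List.pyGet? (h :: t) (0 : Int) = some h := by
    rw [PySem.List.pyGet?_zero]; rfl
  have hA := pvLoopA_inv (h :: t) digits (h :: t).length 0 0 h (by omega) hc0
  simp only [List.drop_zero] at hA
  rw [show ((0 : Nat) : Int) = (0 : Int) by rfl] at hA
  rw [hA]
  -- the fold over h :: t starting at champion h absorbs its first step
  rw [List.foldl_cons, if_neg (lt_irrefl _)]
  -- B's side
  have hB : (PySem.List.sorted (h :: t) (fun num => pvDecodeB num digits) true).head?
      = PySem.List.max? (h :: t) (fun num => pvDecodeB num digits) :=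
    pvHead_sorted_rev _ _
  rw [PySem.List.max?] at hB
  rw [List.foldl_cons] at hB
  have hB' := hB.trans (pvMax?_fold (fun num => pvDecodeB num digits) t h)
  rw [PySem.List.pyGet?_zero, ← List.head?_eq_getElem?, hB']
  simp only [pvDecode_eq]
  rfl
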